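-- pv_equiv track=rewrite | github.com/mhed89/dual-watch-winder | lib/power_ctrl_abstract.py | __combine_args
-- ===== SOURCE A (Python) =====
-- def __combine_args(args) :
--     mask0 = 0
--     mask1 = 0
--     for arg in args:
--         if arg >= 32 :
--             mask1 |= 1 << (arg - 32)
--         else :
--             mask0 |= 1 << arg
--     return mask0, mask1
-- ===== SOURCE B (Python) =====
-- def __combine_args(args):
--     full = 0
--     for arg in args:
--         full |= 1 << arg
--     return full & ((1 << 32) - 1), full >> 32
-- ===== Notes on version B (the rewrite author's own statement) =====
-- stated objective: simpler
-- what changed: Accumulates one combined bitmask with a branch-free loop and splits it once at the end into low 32 bits and the rest, instead of maintaining two masks with an in-loop branch.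
import Mathlib
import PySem

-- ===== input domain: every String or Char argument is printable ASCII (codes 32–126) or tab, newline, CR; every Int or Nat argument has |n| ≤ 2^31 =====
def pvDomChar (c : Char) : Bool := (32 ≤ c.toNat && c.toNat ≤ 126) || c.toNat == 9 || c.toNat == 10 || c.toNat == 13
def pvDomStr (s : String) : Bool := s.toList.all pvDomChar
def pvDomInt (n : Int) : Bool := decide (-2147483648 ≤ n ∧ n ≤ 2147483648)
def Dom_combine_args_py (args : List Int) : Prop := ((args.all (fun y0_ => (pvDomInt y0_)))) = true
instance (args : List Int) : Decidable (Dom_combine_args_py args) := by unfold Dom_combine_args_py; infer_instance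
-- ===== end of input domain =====

-- B accumulates one combined bitmask with a branch-free loop and splits it once at the end
-- (low 32 bits, rest), instead of maintaining two masks with an in-loop branch (objective: simpler).


-- ===== PORT A =====
-- Masks are always nonnegative on Pre_ (all args ≥ 0), so they are kept as Nat and cast at the end.
def combine_args_py (args : List Int) : Int × Int :=
  let p := args.foldl (fun (p : Nat × Nat) (arg : Int) =>
    if arg ≥ 32 then (p.1, p.2 ||| (1 <<< (arg - 32).toNat))
    else (p.1 ||| (1 <<< arg.toNat), p.2)) (0, 0)
  ((p.1 : Int), (p.2 : Int))

-- ===== PORT B =====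
def combine_args_py_alt (args : List Int) : Int × Int :=
  let full := args.foldl (fun (f : Nat) (arg : Int) => f ||| (1 <<< arg.toNat)) 0
  ((full &&& ((1 <<< 32) - 1) : Nat), (full >>> 32 : Nat))

-- ===== PRECONDITION & SPEC =====
-- Pre_ excludes lists containing a negative element: Python A raises ValueError on '1 << negative' there (B raises too).
def Pre_combine_args_py (args : List Int) : Prop := ∀ a ∈ args, 0 ≤ a
instance (args : List Int) : Decidable (Pre_combine_args_py args) := by unfold Pre_combine_args_py; infer_instance
def pvWitness_combine_args_py : List Int := [0, 5, 31, 32, 40, 100]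

def Spec_combine_args_py (args : List Int) (out : Int × Int) : Prop := out = combine_args_py_alt args
instance (args : List Int) (out : Int × Int) : Decidable (Spec_combine_args_py args out) := by unfold Spec_combine_args_py; infer_instance

-- ===== CLAIM (what is proved, stated in full; the proofs are below) =====
def Claim_equal_combine_args_py : Prop := ∀ (args : List Int), Dom_combine_args_py args → Pre_combine_args_py args → Spec_combine_args_py args (combine_args_py args)

-- ===== LEMMAS AND PROOFS =====

theorem pv_and_low (f n : Nat) (h : n < 32) :
    (f ||| (1 <<< n)) &&& ((1 <<< 32) - 1) = (f &&& ((1 <<< 32) - 1)) ||| (1 <<< n) := by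
  apply Nat.eq_of_testBit_eq
  intro i
  simp only [Nat.shiftLeft_eq, one_mul, Nat.testBit_or, Nat.testBit_and,
    Nat.testBit_two_pow, Nat.testBit_two_pow_sub_one]
  by_cases hi : i < 32 <;> by_cases hn : n = i <;> simp [hi, hn] <;> omega

theorem pv_shr_low (f n : Nat) (h : n < 32) :
    (f ||| (1 <<< n)) >>> 32 = f >>> 32 := by
  apply Nat.eq_of_testBit_eq
  intro i
  simp only [Nat.shiftLeft_eq, one_mul, Nat.testBit_shiftRight, Nat.testBit_or, Nat.testBit_two_pow]
  have hne : ¬ (n = 32 + i) := by omega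
  simp [hne]

theorem pv_and_high (f n : Nat) (h : 32 ≤ n) :
    (f ||| (1 <<< n)) &&& ((1 <<< 32) - 1) = f &&& ((1 <<< 32) - 1) := by
  apply Nat.eq_of_testBit_eq
  intro i
  simp only [Nat.shiftLeft_eq, one_mul, Nat.testBit_or, Nat.testBit_and,
    Nat.testBit_two_pow, Nat.testBit_two_pow_sub_one]
  by_cases hi : i < 32 <;> by_cases hn : n = i <;> simp [hi, hn] <;> omega

theorem pv_shr_high (f n : Nat) (h : 32 ≤ n) :
    (f ||| (1 <<< n)) >>> 32 = (f >>> 32) ||| (1 <<< (n - 32)) := by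
  apply Nat.eq_of_testBit_eq
  intro i
  simp only [Nat.shiftLeft_eq, one_mul, Nat.testBit_shiftRight, Nat.testBit_or, Nat.testBit_two_pow]
  by_cases hn : n = 32 + i <;> [skip; skip] <;> have h2 : (n - 32 = i) ↔ (n = 32 + i) := by omega
  all_goals simp [hn, h2]

theorem pv_inv (args : List Int) (f : Nat) :
    args.foldl (fun (p : Nat × Nat) (arg : Int) =>
      if arg ≥ 32 then (p.1, p.2 ||| (1 <<< (arg - 32).toNat))
      else (p.1 ||| (1 <<< arg.toNat), p.2))
      (f &&& ((1 <<< 32) - 1), f >>> 32)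
    = ((args.foldl (fun (g : Nat) (arg : Int) => g ||| (1 <<< arg.toNat)) f) &&& ((1 <<< 32) - 1),
       (args.foldl (fun (g : Nat) (arg : Int) => g ||| (1 <<< arg.toNat)) f) >>> 32) := by
  induction args generalizing f with
  | nil => rfl
  | cons a rest ih =>
    simp only [List.foldl_cons]
    by_cases ha : a ≥ 32
    · have hn : 32 ≤ a.toNat := by omega
      have he : (a - 32).toNat = a.toNat - 32 := by omega
      simp only [ha, if_pos, he]
      rw [show (f &&& ((1 <<< 32) - 1), (f >>> 32) ||| (1 <<< (a.toNat - 32)))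
            = ((f ||| (1 <<< a.toNat)) &&& ((1 <<< 32) - 1), (f ||| (1 <<< a.toNat)) >>> 32) by
          rw [pv_and_high f a.toNat hn, pv_shr_high f a.toNat hn]]
      exact ih (f ||| (1 <<< a.toNat))
    · have hn : a.toNat < 32 := by omega
      simp only [ha, if_neg, not_false_iff]
      rw [show ((f &&& ((1 <<< 32) - 1)) ||| (1 <<< a.toNat), f >>> 32)
            = ((f ||| (1 <<< a.toNat)) &&& ((1 <<< 32) - 1), (f ||| (1 <<< a.toNat)) >>> 32) by
          rw [pv_and_low f a.toNat hn, pv_shr_low f a.toNat hn]]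
      exact ih (f ||| (1 <<< a.toNat))

-- ===== VERDICT (by name: the statement is the Claim_ definition above) =====
theorem combine_args_py_spec : Claim_equal_combine_args_py := by
  intro args _ _
  unfold Spec_combine_args_py combine_args_py combine_args_py_alt
  have h := pv_inv args 0
  simp only [show (0 : Nat) &&& ((1 <<< 32) - 1) = 0 from rfl,
    show (0 : Nat) >>> 32 = 0 from rfl] at h
  simp only [h]
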